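-- pv_equiv track=rewrite | github.com/pps-ungs/supply-chain | variables_de_decision.py | generate_products_to_points_of_sale
-- ===== SOURCE A (Python) =====
-- def generate_products_to_points_of_sale(F:list, S: list, P: list, wDS: list, cp: list):
--     wDP = []
--     for j in range(len(S)):
--         center_j = []
--         products_received = get_products_received_by_center(F, j, wDS)
--         for k in range(len(P)):
--             center_j.append(cp[j][k] * products_received)
--         wDP.append(center_j)
--     return wDP
--
-- def get_products_received_by_center(F: list, distribution_center: int, wDS: list):
--     result = 0
--     for i in range(len(F)):
--         result += wDS[i][distribution_center]
--     return result
-- ===== SOURCE B (Python) =====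
-- def generate_products_to_points_of_sale(F: list, S: list, P: list, wDS: list, cp: list):
--     received = [0] * len(S)
--     for row in wDS[:len(F)]:
--         for j in range(len(S)):
--             received[j] += row[j]
--     return [[cp[j][k] * received[j] for k in range(len(P))] for j in range(len(S))]
-- ===== Notes on version B (the rewrite author's own statement) =====
-- stated objective: alternative
-- what changed: B accumulates a per-center 'received' vector in a single row-wise pass over wDS (transposed traversal) and then builds the matrix in one multiplication pass, instead of re-scanning a whole wDS column per center through a helper call.
import Mathlib
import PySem

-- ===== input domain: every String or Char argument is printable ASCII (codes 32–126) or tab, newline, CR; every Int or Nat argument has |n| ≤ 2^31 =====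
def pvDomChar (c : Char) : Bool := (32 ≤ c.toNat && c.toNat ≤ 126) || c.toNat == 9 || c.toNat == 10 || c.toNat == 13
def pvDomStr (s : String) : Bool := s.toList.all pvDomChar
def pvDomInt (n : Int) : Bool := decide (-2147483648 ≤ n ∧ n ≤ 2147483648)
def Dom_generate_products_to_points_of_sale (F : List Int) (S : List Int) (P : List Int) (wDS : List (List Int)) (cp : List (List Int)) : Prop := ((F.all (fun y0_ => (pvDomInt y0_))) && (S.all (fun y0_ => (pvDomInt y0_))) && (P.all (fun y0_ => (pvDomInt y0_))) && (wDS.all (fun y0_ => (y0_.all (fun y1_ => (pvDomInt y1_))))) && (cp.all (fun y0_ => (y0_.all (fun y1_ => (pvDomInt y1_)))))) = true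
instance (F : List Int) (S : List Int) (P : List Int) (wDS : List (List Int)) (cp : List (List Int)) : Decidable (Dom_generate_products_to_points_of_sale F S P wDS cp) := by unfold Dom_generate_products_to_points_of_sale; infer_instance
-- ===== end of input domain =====

-- B replaces A's per-center column re-scan by one row-wise accumulation pass plus a
-- multiplication pass (same asymptotic cost; a different traversal/decomposition).

-- ===== PORT A =====
-- helper: get_products_received_by_center
def get_products_received_by_center (F : List Int) (distribution_center : Int) (wDS : List (List Int)) : Int :=
  (PySem.List.pyRange 0 F.length 1).foldl
    (fun result i => result + PySem.List.pyGetD (PySem.List.pyGetD wDS i []) distribution_center 0) 0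

def generate_products_to_points_of_sale (F : List Int) (S : List Int) (P : List Int) (wDS : List (List Int)) (cp : List (List Int)) : List (List Int) :=
  (PySem.List.pyRange 0 S.length 1).foldl
    (fun wDP j =>
      let products_received := get_products_received_by_center F j wDS
      let center_j := (PySem.List.pyRange 0 P.length 1).foldl
        (fun c k => c ++ [PySem.List.pyGetD (PySem.List.pyGetD cp j []) k 0 * products_received]) []
      wDP ++ [center_j]) []

-- ===== PORT B =====
def generate_products_to_points_of_sale_alt (F : List Int) (S : List Int) (P : List Int) (wDS : List (List Int)) (cp : List (List Int)) : List (List Int) :=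
  -- received = [0]*len(S); for row in wDS[:len(F)]: for j in range(len(S)): received[j] += row[j]
  -- (wDS[:len(F)] with a nonnegative bound is exactly List.take)
  let received := (wDS.take F.length).foldl
    (fun acc row =>
      (PySem.List.pyRange 0 S.length 1).foldl
        (fun a j => PySem.List.pySetD a j (PySem.List.pyGetD a j 0 + PySem.List.pyGetD row j 0)) acc)
    (List.replicate S.length 0)
  (PySem.List.pyRange 0 S.length 1).map
    (fun j => (PySem.List.pyRange 0 P.length 1).map
      (fun k => PySem.List.pyGetD (PySem.List.pyGetD cp j []) k 0 * PySem.List.pyGetD received j 0))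

-- ===== PRECONDITION & SPEC =====
-- Pre_ excludes exactly the inputs on which Python A raises IndexError (wDS too short or
-- a needed wDS row shorter than S; cp too short or a needed cp row shorter than P).
def Pre_generate_products_to_points_of_sale (F : List Int) (S : List Int) (P : List Int) (wDS : List (List Int)) (cp : List (List Int)) : Prop :=
  S = [] ∨ (F.length ≤ wDS.length ∧ (∀ r ∈ wDS.take F.length, S.length ≤ r.length) ∧
    (P = [] ∨ (S.length ≤ cp.length ∧ ∀ r ∈ cp.take S.length, P.length ≤ r.length)))
instance (F : List Int) (S : List Int) (P : List Int) (wDS : List (List Int)) (cp : List (List Int)) : Decidable (Pre_generate_products_to_points_of_sale F S P wDS cp) := by unfold Pre_generate_products_to_points_of_sale; infer_instance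

def pvWitness_generate_products_to_points_of_sale : List Int × List Int × List Int × List (List Int) × List (List Int) := ([0], [1], [2], [[5]], [[3]])

def Spec_generate_products_to_points_of_sale (F : List Int) (S : List Int) (P : List Int) (wDS : List (List Int)) (cp : List (List Int)) (out : List (List Int)) : Prop := out = generate_products_to_points_of_sale_alt F S P wDS cp
instance (F : List Int) (S : List Int) (P : List Int) (wDS : List (List Int)) (cp : List (List Int)) (out : List (List Int)) : Decidable (Spec_generate_products_to_points_of_sale F S P wDS cp out) := by unfold Spec_generate_products_to_points_of_sale; infer_instance

-- ===== CLAIM (what is proved, stated in full; the proofs are below) =====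
def Claim_equal_generate_products_to_points_of_sale : Prop := ∀ (F : List Int) (S : List Int) (P : List Int) (wDS : List (List Int)) (cp : List (List Int)), Dom_generate_products_to_points_of_sale F S P wDS cp → Pre_generate_products_to_points_of_sale F S P wDS cp → Spec_generate_products_to_points_of_sale F S P wDS cp (generate_products_to_points_of_sale F S P wDS cp)
-- ===== LEMMAS AND PROOFS =====

-- length is preserved by the inner set-fold
lemma length_foldl_set (g : Nat → Int) : ∀ (n : Nat) (acc : List Int),
    ((List.range n).foldl (fun a j => a.set j (a.getD j 0 + g j)) acc).length = acc.length := by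
  intro n
  induction n with
  | zero => intro acc; simp
  | succ n ih =>
    intro acc
    rw [List.range_succ, List.foldl_append]
    simp only [List.foldl_cons, List.foldl_nil, List.length_set]
    exact ih acc

lemma getD_set_ne (l : List Int) (i j : Nat) (v : Int) (h : i ≠ j) :
    (l.set i v).getD j 0 = l.getD j 0 := by
  simp [List.getD_eq_getElem?_getD, h]

lemma getD_set_self (l : List Int) (i : Nat) (v : Int) (h : i < l.length) :
    (l.set i v).getD i 0 = v := by
  simp [List.getD_eq_getElem?_getD, h]

-- pointwise value of the inner set-fold
lemma foldl_set_getD (g : Nat → Int) : ∀ (n : Nat) (acc : List Int) (m : Nat), n ≤ acc.length →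
    ((List.range n).foldl (fun a j => a.set j (a.getD j 0 + g j)) acc).getD m 0
      = if m < n then acc.getD m 0 + g m else acc.getD m 0 := by
  intro n
  induction n with
  | zero => intro acc m _; simp
  | succ n ih =>
    intro acc m h
    rw [List.range_succ, List.foldl_append]
    simp only [List.foldl_cons, List.foldl_nil]
    by_cases hm : m = n
    · subst hm
      rw [getD_set_self _ _ _ (by rw [length_foldl_set]; omega), ih acc m (by omega)]
      simp
    · rw [getD_set_ne _ _ _ _ (fun e => hm e.symm), ih acc m (by omega)]
      by_cases h2 : m < n
      · simp [h2, Nat.lt_succ_of_lt h2]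
      · have h3 : ¬ m < n + 1 := by omega
        simp [h2, h3]

-- pointwise value of the received-vector fold
lemma received_getD (T : List (List Int)) (n : Nat) : ∀ (acc : List Int), acc.length = n → ∀ (m : Nat), m < n →
    (T.foldl (fun acc row => (List.range n).foldl (fun a j => a.set j (a.getD j 0 + row.getD j 0)) acc) acc).getD m 0
      = acc.getD m 0 + (T.map (fun row => row.getD m 0)).sum := by
  induction T with
  | nil => intro acc _ m _; simp
  | cons row T ih =>
    intro acc hlen m hm
    simp only [List.foldl_cons, List.map_cons, List.sum_cons]
    rw [ih _ (by rw [length_foldl_set]; exact hlen) m hm,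
        foldl_set_getD _ n acc m (by omega)]
    simp [hm]; ring

-- A's column sum equals the row-wise sum over the taken rows
lemma column_sum_eq (wDS : List (List Int)) (m : Nat) : ∀ (fl : Nat),
    (((List.range fl).map (fun i => (wDS.getD i ([]:List Int)).getD m 0)).sum)
      = (((wDS.take fl).map (fun row => row.getD m 0)).sum) := by
  intro fl
  induction fl with
  | zero => simp
  | succ fl ih =>
    rw [List.range_succ, List.take_add_one]
    simp only [List.map_append, List.sum_append, ih]
    cases h : wDS[fl]? with
    | none => simp [List.getD_eq_getElem?_getD, h]
    | some r => simp [List.getD_eq_getElem?_getD, h]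

-- ===== VERDICT (by name: the statement is the Claim_ definition above) =====
theorem generate_products_to_points_of_sale_spec : Claim_equal_generate_products_to_points_of_sale := by
  intro F S P wDS cp _ _
  unfold Spec_generate_products_to_points_of_sale
  unfold generate_products_to_points_of_sale generate_products_to_points_of_sale_alt
  rw [PySem.List.foldl_append_singleton_eq_map]
  simp only [List.nil_append]
  apply List.map_congr_left
  intro j hj
  rw [PySem.List.foldl_append_singleton_eq_map]
  simp only [List.nil_append]
  apply List.map_congr_left
  intro k _
  congr 1
  -- products_received = received[j]
  obtain ⟨hj0, hjS⟩ := (PySem.List.mem_pyRange_one).1 hj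
  unfold get_products_received_by_center
  rw [PySem.List.foldl_add, PySem.List.pyRange_zero_nat]
  rw [List.map_map]
  have hjn : j = ((j.toNat : Nat) : Int) := by omega
  rw [hjn]
  simp only [Function.comp_def, PySem.List.pyGetD_natCast]
  rw [column_sum_eq wDS j.toNat F.length]
  simp only [PySem.List.pyRange_zero_nat, List.foldl_map]
  simp only [PySem.List.pyGetD_natCast, PySem.List.pySetD_natCast]
  rw [received_getD (wDS.take F.length) S.length (List.replicate S.length 0) (by simp) j.toNat (by omega)]
  simp
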